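-- pv_equiv track=rewrite | github.com/geraldinecv12-cpu/acta-reuniones | generate_acta.py | extract_meeting_info
-- ===== SOURCE A (Python) =====
-- def extract_meeting_info(transcript_lines):
--     participants = []
--     agenda_items = []
--     discussed_topics = []
--     agreed_commits = []
--
--     for line in transcript_lines:
--         if line.startswith('Participant: '):
--             participants.append(line.replace('Participant: ', '').strip())
--         elif line.startswith('Agenda: '):
--             agenda_items.append(line.replace('Agenda: ', '').strip())
--         elif line.startswith('Discussed: '):
--             discussed_topics.append(line.replace('Discussed: ', '').strip())
--         elif line.startswith('Commit: '):
--             agreed_commits.append(line.replace('Commit: ', '').strip())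
--
--     return participants, agenda_items, discussed_topics, agreed_commits
-- ===== SOURCE B (Python) =====
-- PREFIXES = ['Participant: ', 'Agenda: ', 'Discussed: ', 'Commit: ']
--
--
-- def _classify(line):
--     for i, p in enumerate(PREFIXES):
--         if line.startswith(p):
--             return i, line.replace(p, '').strip()
--     return None
--
--
-- def extract_meeting_info(transcript_lines):
--     tagged = [t for t in map(_classify, transcript_lines) if t is not None]
--     return tuple([v for i, v in tagged if i == k] for k in range(4))
-- ===== Notes on version B (the rewrite author's own statement) =====
-- stated objective: idiomatic
-- what changed: Replaces the four-accumulator if/elif loop by a classify step (first matching prefix from a prefix table, via map/filter) followed by one filter per category, keeping replace-all-then-strip semantics.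
import Mathlib
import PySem

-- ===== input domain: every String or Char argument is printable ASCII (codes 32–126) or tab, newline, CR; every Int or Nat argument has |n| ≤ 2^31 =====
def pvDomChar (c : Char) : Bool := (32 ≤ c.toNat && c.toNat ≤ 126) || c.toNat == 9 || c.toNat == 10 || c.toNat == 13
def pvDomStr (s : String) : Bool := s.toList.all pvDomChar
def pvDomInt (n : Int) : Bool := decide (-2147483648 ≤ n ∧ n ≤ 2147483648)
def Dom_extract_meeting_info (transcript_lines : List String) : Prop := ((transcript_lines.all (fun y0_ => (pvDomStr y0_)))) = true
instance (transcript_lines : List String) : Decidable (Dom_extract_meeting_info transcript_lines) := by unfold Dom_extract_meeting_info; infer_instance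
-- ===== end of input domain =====

-- B is a structurally different (classify-then-filter) re-implementation with identical return values; objective: idiomatic.

-- ===== PORT A =====
def pvStepA (st : List String × List String × List String × List String) (line : String) :
    List String × List String × List String × List String :=
  let (p, a, d, c) := st
  if PySem.Str.startswith line "Participant: " then
    (p ++ [PySem.Str.strip (PySem.Str.replace line "Participant: " "")], a, d, c)
  else if PySem.Str.startswith line "Agenda: " then
    (p, a ++ [PySem.Str.strip (PySem.Str.replace line "Agenda: " "")], d, c)
  else if PySem.Str.startswith line "Discussed: " then
    (p, a, d ++ [PySem.Str.strip (PySem.Str.replace line "Discussed: " "")], c)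
  else if PySem.Str.startswith line "Commit: " then
    (p, a, d, c ++ [PySem.Str.strip (PySem.Str.replace line "Commit: " "")])
  else (p, a, d, c)

def extract_meeting_info (transcript_lines : List String) :
    List String × List String × List String × List String :=
  transcript_lines.foldl pvStepA ([], [], [], [])

-- ===== PORT B =====
def pvPrefixes : List String := ["Participant: ", "Agenda: ", "Discussed: ", "Commit: "]

-- first prefix (with its index) that the line starts with, as in Source B's _classify
def pvClassify (line : String) : Option (Int × String) :=
  ((PySem.List.enumerate pvPrefixes).find? (fun ip => PySem.Str.startswith line ip.2)).map
    (fun ip => (ip.1, PySem.Str.strip (PySem.Str.replace line ip.2 "")))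

def extract_meeting_info_alt (transcript_lines : List String) :
    List String × List String × List String × List String :=
  let tagged := transcript_lines.filterMap pvClassify
  ((tagged.filter (fun t => t.1 == 0)).map (fun t => t.2),
   (tagged.filter (fun t => t.1 == 1)).map (fun t => t.2),
   (tagged.filter (fun t => t.1 == 2)).map (fun t => t.2),
   (tagged.filter (fun t => t.1 == 3)).map (fun t => t.2))

-- ===== PRECONDITION & SPEC =====
def Spec_extract_meeting_info (transcript_lines : List String) (out : List String × List String × List String × List String) : Prop := out = extract_meeting_info_alt transcript_lines
instance (transcript_lines : List String) (out : List String × List String × List String × List String) : Decidable (Spec_extract_meeting_info transcript_lines out) := by unfold Spec_extract_meeting_info; infer_instance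

-- ===== CLAIM (what is proved, stated in full; the proofs are below) =====
def Claim_equal_extract_meeting_info : Prop := ∀ (transcript_lines : List String), Dom_extract_meeting_info transcript_lines → Spec_extract_meeting_info transcript_lines (extract_meeting_info transcript_lines)

-- ===== LEMMAS AND PROOFS =====

theorem pvFoldl_eq (ls : List String) : ∀ (p a d c : List String),
    ls.foldl pvStepA (p, a, d, c) =
      (p ++ (extract_meeting_info_alt ls).1,
       a ++ (extract_meeting_info_alt ls).2.1,
       d ++ (extract_meeting_info_alt ls).2.2.1,
       c ++ (extract_meeting_info_alt ls).2.2.2) := by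
  induction ls with
  | nil => intro p a d c; simp [extract_meeting_info_alt]
  | cons l rest ih =>
    intro p a d c
    simp only [List.foldl_cons]
    by_cases h0 : PySem.Chars.startswith l.toList "Participant: ".toList
    · simp at h0
      simp [pvStepA, h0, ih, extract_meeting_info_alt, pvClassify, pvPrefixes,
        PySem.List.enumerate, List.find?]
    · by_cases h1 : PySem.Chars.startswith l.toList "Agenda: ".toList
      · simp at h0 h1
        simp [pvStepA, h0, h1, ih, extract_meeting_info_alt, pvClassify, pvPrefixes,
          PySem.List.enumerate, List.find?]
      · by_cases h2 : PySem.Chars.startswith l.toList "Discussed: ".toList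
        · simp at h0 h1 h2
          simp [pvStepA, h0, h1, h2, ih, extract_meeting_info_alt, pvClassify, pvPrefixes,
            PySem.List.enumerate, List.find?]
        · by_cases h3 : PySem.Chars.startswith l.toList "Commit: ".toList
          · simp at h0 h1 h2 h3
            simp [pvStepA, h0, h1, h2, h3, ih, extract_meeting_info_alt, pvClassify, pvPrefixes,
              PySem.List.enumerate, List.find?]
          · simp at h0 h1 h2 h3
            simp [pvStepA, h0, h1, h2, h3, ih, extract_meeting_info_alt, pvClassify, pvPrefixes,
              PySem.List.enumerate, List.find?]

-- ===== VERDICT (by name: the statement is the Claim_ definition above) =====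
theorem extract_meeting_info_spec : Claim_equal_extract_meeting_info := by
  intro ls _
  unfold Spec_extract_meeting_info extract_meeting_info
  simpa using pvFoldl_eq ls [] [] [] []
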